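-- pv_equiv track=rewrite | github.com/Jerempire/gym-anything | benchmarks/cua_world/environments/graphite_env/tasks/wow_deployment_baseline/verifier.py | _find_graph
-- ===== SOURCE A (Python) =====
-- def _find_graph(graphs, expected_title):
--     """Find a graph by exact or case-insensitive title match."""
--     for title, targets in graphs:
--         if title == expected_title:
--             return targets
--     for title, targets in graphs:
--         if expected_title.lower() in title.lower():
--             return targets
--     return None
-- ===== SOURCE B (Python) =====
-- def _find_graph(graphs, expected_title):
--     """Single pass: return on exact match, remember first substring match as fallback."""
--     exp = expected_title.lower()
--     fallback = None
--     fallback_set = False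
--     for title, targets in graphs:
--         if title == expected_title:
--             return targets
--         if not fallback_set and exp in title.lower():
--             fallback = targets
--             fallback_set = True
--     return fallback
-- ===== Notes on version B (the rewrite author's own statement) =====
-- stated objective: faster
-- what changed: Replaced A's two sequential priority passes (exact scan, then substring scan, lowering expected_title on every iteration) by a single pass that lowers expected_title once and keeps the first substring match as a fallback while looking for an exact match.
import Mathlib
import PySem

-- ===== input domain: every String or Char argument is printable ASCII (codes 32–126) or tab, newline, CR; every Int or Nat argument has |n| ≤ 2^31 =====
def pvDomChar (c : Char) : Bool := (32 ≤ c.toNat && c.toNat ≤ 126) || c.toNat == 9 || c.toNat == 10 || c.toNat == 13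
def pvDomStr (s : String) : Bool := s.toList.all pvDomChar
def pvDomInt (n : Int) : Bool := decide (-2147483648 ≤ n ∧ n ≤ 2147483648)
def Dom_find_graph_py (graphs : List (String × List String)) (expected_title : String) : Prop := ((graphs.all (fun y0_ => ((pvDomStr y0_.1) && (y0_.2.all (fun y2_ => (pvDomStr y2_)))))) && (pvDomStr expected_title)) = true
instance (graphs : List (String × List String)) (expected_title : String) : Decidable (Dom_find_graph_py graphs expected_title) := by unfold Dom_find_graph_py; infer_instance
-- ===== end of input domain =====

-- B collapses A's two priority passes (exact, then substring) into one pass with a remembered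
-- first-substring-match fallback; the needle is lowered once. Same return value everywhere.

-- ===== PORT A =====
-- A's first loop: return targets on the first exact title match.
def pvA_exactLoop (graphs : List (String × List String)) (expected_title : String) : Option (List String) :=
  match graphs with
  | [] => none
  | (title, targets) :: rest =>
    if title == expected_title then some targets else pvA_exactLoop rest expected_title

-- A's second loop: return targets on the first case-insensitive substring match.
def pvA_subLoop (graphs : List (String × List String)) (expected_title : String) : Option (List String) :=
  match graphs with
  | [] => none
  | (title, targets) :: rest =>
    if PySem.Str.isIn (PySem.Str.lower expected_title) (PySem.Str.lower title) then some targets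
    else pvA_subLoop rest expected_title

def find_graph_py (graphs : List (String × List String)) (expected_title : String) : Option (List String) :=
  match pvA_exactLoop graphs expected_title with
  | some targets => some targets
  | none =>
    match pvA_subLoop graphs expected_title with
    | some targets => some targets
    | none => none

-- ===== PORT B =====
-- B's single loop; fb is the fallback (none = not yet set).
def pvB_loop (exp expected_title : String) (graphs : List (String × List String))
    (fb : Option (List String)) : Option (List String) :=
  match graphs with
  | [] => fb
  | (title, targets) :: rest =>
    if title == expected_title then some targets
    else
      pvB_loop exp expected_title rest
        (if fb.isNone && PySem.Str.isIn exp (PySem.Str.lower title) then some targets else fb)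

def find_graph_py_alt (graphs : List (String × List String)) (expected_title : String) : Option (List String) :=
  pvB_loop (PySem.Str.lower expected_title) expected_title graphs none

-- ===== PRECONDITION & SPEC =====
def Spec_find_graph_py (graphs : List (String × List String)) (expected_title : String) (out : Option (List String)) : Prop := out = find_graph_py_alt graphs expected_title
instance (graphs : List (String × List String)) (expected_title : String) (out : Option (List String)) : Decidable (Spec_find_graph_py graphs expected_title out) := by unfold Spec_find_graph_py; infer_instance

-- ===== CLAIM (what is proved, stated in full; the proofs are below) =====
def Claim_equal_find_graph_py : Prop := ∀ (graphs : List (String × List String)) (expected_title : String), Dom_find_graph_py graphs expected_title → Spec_find_graph_py graphs expected_title (find_graph_py graphs expected_title)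

-- ===== LEMMAS AND PROOFS =====

-- Loop invariant: B's single pass equals A's exact pass, falling back (when the fallback is
-- still unset) to A's substring pass on the remaining list.
theorem pvB_loop_eq (e : String) (graphs : List (String × List String)) (fb : Option (List String)) :
    pvB_loop (PySem.Str.lower e) e graphs fb =
      match pvA_exactLoop graphs e with
      | some t => some t
      | none =>
        match fb with
        | some x => some x
        | none => pvA_subLoop graphs e := by
  induction graphs generalizing fb with
  | nil => cases fb <;> simp [pvB_loop, pvA_exactLoop, pvA_subLoop]
  | cons p rest ih =>
    obtain ⟨title, targets⟩ := p
    by_cases h : title = e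
    · simp [pvB_loop, pvA_exactLoop, h]
    · simp only [pvB_loop, pvA_exactLoop, pvA_subLoop, beq_iff_eq, h, if_false, ih]
      cases fb with
      | some x => simp
      | none =>
        by_cases hs : PySem.Str.isIn (PySem.Str.lower e) (PySem.Str.lower title) = true <;>
          simp only [PySem.Str.isIn_eq, PySem.Str.toList_lower] at hs <;>
          simp [hs] <;> cases pvA_exactLoop rest e <;> rfl

-- ===== VERDICT (by name: the statement is the Claim_ definition above) =====
theorem find_graph_py_spec : Claim_equal_find_graph_py := by
  intro graphs e _
  unfold Spec_find_graph_py find_graph_py find_graph_py_alt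
  rw [pvB_loop_eq]
  cases pvA_exactLoop graphs e <;> cases pvA_subLoop graphs e <;> simp
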